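-- pv_equiv track=rewrite | github.com/vigoferrel/quantum-nlp-service | vanguard_definitive_system.py | _generate_markov_chain
-- ===== SOURCE A (Python) =====
-- from typing import Dict, List, Any, Optional, Tuple
-- from collections import defaultdict
--
-- def _generate_markov_chain(text: str) -> Dict[str, List[str]]:
--     """Genera cadena de Markov optimizada"""
--     if not text or len(text.strip()) < 50:
--         return {"default": ["response", "generated", "successfully"]}
--
--     words = text.replace('\n', ' ').replace('\t', ' ').split()
--     words = [word.strip().lower() for word in words if len(word.strip()) > 2]
--
--     if len(words) < 10:
--         return {"default": ["content", "processed", "effectively"]}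
--
--     markov_chain = defaultdict(list)
--     for i in range(len(words) - 1):
--         markov_chain[words[i]].append(words[i + 1])
--
--     # Optimizar cadena
--     optimized_chain = {}
--     for word, next_words in markov_chain.items():
--         if len(next_words) > 0:
--             word_counts = defaultdict(int)
--             for next_word in next_words:
--                 word_counts[next_word] += 1
--
--             sorted_words = sorted(word_counts.items(), key=lambda x: x[1], reverse=True)
--             top_words = [word for word, count in sorted_words[:5] if len(word) > 2]
--
--             if top_words:
--                 optimized_chain[word] = top_words
--
--     return optimized_chain if optimized_chain else {"default": ["optimized", "successfully"]}
-- ===== SOURCE B (Python) =====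
-- def _generate_markov_chain(text: str):
--     """Markov chain; top-5 successors found by repeated max-extraction, no sorting."""
--     if not text or len(text.strip()) < 50:
--         return {"default": ["response", "generated", "successfully"]}
--
--     words = [w.strip().lower() for w in text.replace('\n', ' ').replace('\t', ' ').split()
--              if len(w.strip()) > 2]
--
--     if len(words) < 10:
--         return {"default": ["content", "processed", "effectively"]}
--
--     # one pass: nested counters counts[word][next] += 1 (no successor lists kept)
--     counts = {}
--     for prev, nxt in zip(words, words[1:]):
--         inner = counts.setdefault(prev, {})
--         inner[nxt] = inner.get(nxt, 0) + 1
--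
--     optimized_chain = {}
--     for word, word_map in counts.items():
--         # top-5 by bounded selection: 5 rounds of extract-first-max, no sort at all
--         # (Python's max returns the FIRST maximal item: same tie-break as a stable sort)
--         items = list(word_map.items())
--         top = []
--         for _ in range(5):
--             if not items:
--                 break
--             best = max(items, key=lambda it: it[1])
--             items.remove(best)
--             if len(best[0]) > 2:
--                 top.append(best[0])
--         if top:
--             optimized_chain[word] = top
--
--     return optimized_chain or {"default": ["optimized", "successfully"]}
-- ===== Notes on version B (the rewrite author's own statement) =====
-- stated objective: alternative
-- what changed: B counts successors in one zip pass into nested counters (no successor lists materialised and re-counted) and replaces A's full stable sort of each word's counter by bounded selection: five rounds of extract-first-maximum (max + remove), so no sorting happens anywhere; trades an O(S log S) sort for O(5*S) selection per word.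
import Mathlib
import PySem

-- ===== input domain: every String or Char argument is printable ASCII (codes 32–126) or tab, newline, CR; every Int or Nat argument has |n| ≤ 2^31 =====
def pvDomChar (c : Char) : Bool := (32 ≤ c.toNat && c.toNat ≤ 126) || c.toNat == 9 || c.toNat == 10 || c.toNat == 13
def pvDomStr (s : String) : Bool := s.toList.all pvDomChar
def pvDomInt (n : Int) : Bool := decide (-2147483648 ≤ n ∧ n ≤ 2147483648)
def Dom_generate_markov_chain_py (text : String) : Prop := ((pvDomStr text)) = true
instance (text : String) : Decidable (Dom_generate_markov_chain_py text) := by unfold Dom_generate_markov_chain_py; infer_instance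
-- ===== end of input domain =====

-- B counts successors in one zip pass into nested counters and finds each word's top-5 by five
-- rounds of extract-first-maximum (max + remove) instead of A's successor lists, re-count and
-- full stable sort; objective: alternative (no sorting anywhere).

-- ===== PORT A =====
def generate_markov_chain_py (text : String) : List (String × List String) :=
  if text = "" ∨ PySem.Str.len (PySem.Str.strip text) < 50 then
    [("default", ["response", "generated", "successfully"])]
  else
    let words0 := PySem.Str.split₀ (PySem.Str.replace (PySem.Str.replace text "\n" " ") "\t" " ")
    let words := (words0.filter (fun w => 2 < PySem.Str.len (PySem.Str.strip w))).map
      (fun w => PySem.Str.lower (PySem.Str.strip w))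
    if PySem.List.len words < 10 then
      [("default", ["content", "processed", "effectively"])]
    else
      -- for i in range(len(words)-1): markov_chain[words[i]].append(words[i+1])
      let markov : PySem.Dict String (List String) :=
        (PySem.List.pyRange 0 (PySem.List.len words - 1) 1).foldl
          (fun d i => d.modify (PySem.List.pyGetD words i "") []
            (fun l => l ++ [PySem.List.pyGetD words (i + 1) ""])) PySem.Dict.empty
      let optimized : PySem.Dict String (List String) :=
        markov.items.foldl (fun acc p =>
          if 0 < p.2.length then
            let wc : PySem.Dict String Int :=
              p.2.foldl (fun d x => d.modify x 0 (fun c => c + 1)) PySem.Dict.empty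
            let sw := PySem.List.sorted wc.items (fun q => q.2) true
            let top := ((PySem.List.slice sw none (some 5)).filter
              (fun q => 2 < PySem.Str.len q.1)).map (fun q => q.1)
            if top ≠ [] then acc.insert p.1 top else acc
          else acc) PySem.Dict.empty
      if optimized.items ≠ [] then optimized.items
      else [("default", ["optimized", "successfully"])]

-- ===== PORT B =====
-- the 5-round selection loop: best = max(items, key=count) (FIRST maximal item), items.remove(best),
-- keep best's word when len > 2; 'break' = the max? none branch; remove never misses (best ∈ items)
def pvPick5 : Nat → List (String × Int) → List String → List String
  | 0, _, top => top
  | Nat.succ k, items, top =>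
      match PySem.List.max? items (fun it => it.2) with
      | none => top
      | some best =>
          pvPick5 k ((PySem.List.remove? items best).getD items)
            (if 2 < PySem.Str.len best.1 then top ++ [best.1] else top)

def generate_markov_chain_py_alt (text : String) : List (String × List String) :=
  if text = "" ∨ PySem.Str.len (PySem.Str.strip text) < 50 then
    [("default", ["response", "generated", "successfully"])]
  else
    let words := ((PySem.Str.split₀ (PySem.Str.replace (PySem.Str.replace text "\n" " ") "\t" " ")).filter
      (fun w => 2 < PySem.Str.len (PySem.Str.strip w))).map
      (fun w => PySem.Str.lower (PySem.Str.strip w))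
    if PySem.List.len words < 10 then
      [("default", ["content", "processed", "effectively"])]
    else
      -- for prev, nxt in zip(words, words[1:]): counts[prev][nxt] += 1  (nested counters)
      let counts : PySem.Dict String (PySem.Dict String Int) :=
        (words.zip words.tail).foldl
          (fun d p => d.modify p.1 PySem.Dict.empty
            (fun inner => inner.insert p.2 (inner.getD p.2 0 + 1))) PySem.Dict.empty
      let optimized : PySem.Dict String (List String) :=
        counts.items.foldl (fun acc p =>
          let top := pvPick5 5 p.2.items []
          if top ≠ [] then acc.insert p.1 top else acc) PySem.Dict.empty
      if optimized.items ≠ [] then optimized.items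
      else [("default", ["optimized", "successfully"])]

-- ===== PRECONDITION & SPEC =====
def Spec_generate_markov_chain_py (text : String) (out : List (String × List String)) : Prop := out = generate_markov_chain_py_alt text
instance (text : String) (out : List (String × List String)) : Decidable (Spec_generate_markov_chain_py text out) := by unfold Spec_generate_markov_chain_py; infer_instance

-- ===== CLAIM (what is proved, stated in full; the proofs are below) =====
def Claim_equal_generate_markov_chain_py : Prop := ∀ (text : String), Dom_generate_markov_chain_py text → Spec_generate_markov_chain_py text (generate_markov_chain_py text)

-- ===== LEMMAS AND PROOFS =====

-- ---- selection = take-5 of the stable descending sort ----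

-- fuel-limited selection of pairs: k times (first max, then the list with it removed)
def pvSel : Nat → List (String × Int) → List (String × Int)
  | 0, _ => []
  | Nat.succ k, l =>
      match PySem.List.max? l (fun it => it.2) with
      | none => []
      | some m => m :: pvSel k ((PySem.List.remove? l m).getD l)

theorem pv_max?_append_none (l : List (String × Int)) (x : String × Int)
    (h : PySem.List.max? l (fun it => it.2) = none) :
    PySem.List.max? (l ++ [x]) (fun it => it.2) = some x := by
  simp only [PySem.List.max?] at h ⊢
  rw [List.foldl_append, h]
  rfl

theorem pv_max?_append_some (l : List (String × Int)) (x m : String × Int)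
    (h : PySem.List.max? l (fun it => it.2) = some m) :
    PySem.List.max? (l ++ [x]) (fun it => it.2) = if m.2 < x.2 then some x else some m := by
  simp only [PySem.List.max?] at h ⊢
  rw [List.foldl_append, h]
  rfl

theorem pv_remove?_append_of_mem (l t : List (String × Int)) (v : String × Int) (h : v ∈ l) :
    PySem.List.remove? (l ++ t) v = (PySem.List.remove? l v).map (· ++ t) := by
  induction l with
  | nil => simp at h
  | cons a l ih =>
      simp only [PySem.List.remove?, List.cons_append, List.idxOf?_cons]
      by_cases hv : a = v
      · simp [hv]
      · have hb : (a == v) = false := beq_eq_false_iff_ne.mpr hv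
        have h' : v ∈ l := by
          rcases List.mem_cons.mp h with h | h
          · exact absurd h.symm hv
          · exact h
        have heq := ih h'
        simp only [PySem.List.remove?] at heq
        simp only [hb, if_false]
        cases hidx : List.idxOf? v l with
        | none =>
            rw [hidx] at heq; simp at heq
            simp [heq]
        | some k =>
            rw [hidx] at heq; simp at heq
            cases hidx2 : List.idxOf? v (l ++ t) with
            | none => rw [hidx2] at heq; simp at heq
            | some k2 =>
                rw [hidx2] at heq; simp at heq
                simp [List.eraseIdx_cons_succ, heq]

theorem pv_remove?_append_singleton_of_not_mem (l : List (String × Int)) (x : String × Int)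
    (h : x ∉ l) :
    PySem.List.remove? (l ++ [x]) x = some l := by
  induction l with
  | nil => simp [PySem.List.remove?, List.idxOf?_cons]
  | cons a l ih =>
      have hb : (a == x) = false := beq_eq_false_iff_ne.mpr (fun he => h (he ▸ List.mem_cons_self))
      have h' : x ∉ l := fun hm => h (List.mem_cons_of_mem _ hm)
      have heq := ih h'
      simp only [PySem.List.remove?, List.cons_append, List.idxOf?_cons, hb] at heq ⊢
      cases hidx : List.idxOf? x (l ++ [x]) with
      | none => rw [hidx] at heq; simp at heq
      | some k =>
          rw [hidx] at heq; simp at heq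
          simp [List.eraseIdx_cons_succ, heq]


theorem pv_sorted_append_singleton (l : List (String × Int)) (x : String × Int) :
    PySem.List.sorted (l ++ [x]) (fun it => it.2) true
      = PySem.List.insertBy (fun a b => decide (b.2 < a.2)) x
          (PySem.List.sorted l (fun it => it.2) true) := by
  rw [PySem.List.sorted_rev_eq_foldl_insertBy, PySem.List.sorted_rev_eq_foldl_insertBy,
    List.foldl_append]
  rfl

theorem pv_insertBy_cons (before : (String × Int) → (String × Int) → Bool) (x y : String × Int)
    (ys : List (String × Int)) :
    PySem.List.insertBy before x (y :: ys)
      = if before x y then x :: y :: ys else y :: PySem.List.insertBy before x ys := rfl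

theorem pv_remove?_of_mem (l : List (String × Int)) (v : String × Int) (h : v ∈ l) :
    ∃ r, PySem.List.remove? l v = some r := by
  cases hidx : List.idxOf? v l with
  | none => exact absurd ((List.idxOf?_eq_none_iff).mp hidx) (by simp [h])
  | some k => exact ⟨l.eraseIdx k, by simp [PySem.List.remove?, hidx]⟩

theorem pv_sorted_cons_max (l : List (String × Int)) :
    ∀ (m : String × Int) (r : List (String × Int)),
    PySem.List.max? l (fun it => it.2) = some m →
    PySem.List.remove? l m = some r →
    PySem.List.sorted l (fun it => it.2) true
      = m :: PySem.List.sorted r (fun it => it.2) true := by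
  induction l using List.reverseRecOn with
  | nil => intro m r hm hr; simp [PySem.List.max?] at hm
  | append_singleton l x ih =>
      intro m r hm hr
      cases hl : PySem.List.max? l (fun it => it.2) with
      | none =>
          have hnil : l = [] := (PySem.List.max?_eq_none_iff _ _).mp hl
          subst hnil
          rw [pv_max?_append_none _ _ hl] at hm
          obtain rfl : x = m := by injection hm
          simp only [List.nil_append] at hr ⊢
          have : PySem.List.remove? [x] x = some [] := by
            simp [PySem.List.remove?, List.idxOf?_cons]
          rw [this] at hr
          obtain rfl : ([] : List (String × Int)) = r := by injection hr
          rfl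
      | some m0 =>
          have hm0mem : m0 ∈ l := PySem.List.max?_mem hl
          obtain ⟨r0, hr0⟩ := pv_remove?_of_mem l m0 hm0mem
          have IH := ih m0 r0 hl hr0
          rw [pv_max?_append_some _ _ _ hl] at hm
          by_cases hx : m0.2 < x.2
          · rw [if_pos hx] at hm
            obtain rfl : x = m := by injection hm
            have hxnot : x ∉ l := fun hxl => by
              have := PySem.List.max?_isMax hl x hxl
              simp at this; omega
            rw [pv_remove?_append_singleton_of_not_mem l x hxnot] at hr
            obtain rfl : l = r := by injection hr
            rw [pv_sorted_append_singleton, IH, pv_insertBy_cons]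
            have hb : (decide (m0.2 < x.2)) = true := by simp [hx]
            rw [if_pos hb, ← IH]
          · rw [if_neg hx] at hm
            obtain rfl : m0 = m := by injection hm
            rw [pv_remove?_append_of_mem l [x] m0 hm0mem, hr0] at hr
            obtain rfl : r0 ++ [x] = r := by injection hr
            rw [pv_sorted_append_singleton, IH, pv_insertBy_cons]
            have hb : (decide (m0.2 < x.2)) = false := by simp [hx]
            rw [hb, if_neg (by simp), ← pv_sorted_append_singleton]



theorem pv_take_sorted_eq_sel (k : Nat) (l : List (String × Int)) :
    (PySem.List.sorted l (fun it => it.2) true).take k = pvSel k l := by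
  induction k generalizing l with
  | zero => simp [pvSel]
  | succ k ih =>
      cases hm : PySem.List.max? l (fun it => it.2) with
      | none =>
          have : l = [] := (PySem.List.max?_eq_none_iff _ _).mp hm
          subst this
          simp [pvSel, PySem.List.max?, (PySem.List.sorted_eq_nil_iff _ _ _).mpr rfl]
      | some m =>
          obtain ⟨r, hr⟩ := pv_remove?_of_mem l m (PySem.List.max?_mem hm)
          rw [pv_sorted_cons_max l m r hm hr]
          simp only [pvSel, hm, hr, List.take_succ_cons, Option.getD_some]
          rw [ih]

theorem pv_pick5_eq (k : Nat) (l : List (String × Int)) (top : List String) :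
    pvPick5 k l top
      = top ++ ((pvSel k l).filter (fun q => 2 < PySem.Str.len q.1)).map (fun q => q.1) := by
  induction k generalizing l top with
  | zero => simp [pvPick5, pvSel]
  | succ k ih =>
      cases hm : PySem.List.max? l (fun it => it.2) with
      | none => simp [pvPick5, pvSel, hm]
      | some m =>
          simp only [pvPick5, pvSel, hm]
          rw [ih]
          by_cases hlen : 2 < m.1.length
          · rw [if_pos (by simp [PySem.Str.len_eq]; exact_mod_cast hlen)]
            simp [hlen]
          · rw [if_neg (by simp [PySem.Str.len_eq]; omega)]
            simp [hlen]

theorem pvTop5_eq (l : List (String × Int)) :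
    pvPick5 5 l []
      = ((PySem.List.slice (PySem.List.sorted l (fun q => q.2) true) none (some 5)).filter
          (fun q => 2 < PySem.Str.len q.1)).map (fun q => q.1) := by
  rw [PySem.List.slice_to _ (by omega), pv_take_sorted_eq_sel, pv_pick5_eq]
  simp

-- ---- A's list-building + re-counting = B's nested counters (as before) ----

-- A's index loop over range(len(xs)-1) reading xs[i], xs[i+1] is the fold over zip(xs, xs[1:]).
theorem pyrange_pairs_fold {α β : Type} [Inhabited α] (xs : List α) (h : xs ≠ [])
    (g : β → α → α → β) (init : β) (d : α) :
    (PySem.List.pyRange 0 (PySem.List.len xs - 1) 1).foldl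
      (fun acc i => g acc (PySem.List.pyGetD xs i d) (PySem.List.pyGetD xs (i + 1) d)) init
    = (xs.zip xs.tail).foldl (fun acc p => g acc p.1 p.2) init := by
  have hx : 1 ≤ xs.length := List.length_pos_iff.mpr h
  have hzl : (xs.zip xs.tail).length = xs.length - 1 := by
    simp [List.length_zip, List.length_tail]
  have hlen : PySem.List.len xs - 1 = PySem.List.len (xs.zip xs.tail) := by
    simp [PySem.List.len_eq, hzl]
    omega
  rw [hlen]
  calc (PySem.List.pyRange 0 (PySem.List.len (xs.zip xs.tail)) 1).foldl
        (fun acc i => g acc (PySem.List.pyGetD xs i d) (PySem.List.pyGetD xs (i + 1) d)) init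
      = (PySem.List.pyRange 0 (PySem.List.len (xs.zip xs.tail)) 1).foldl
        (fun acc i => (fun acc (p : α × α) => g acc p.1 p.2) acc
          (PySem.List.pyGetD (xs.zip xs.tail) i (d, d))) init := by
        apply PySem.List.foldl_congr_mem
        intro acc i hi
        rw [PySem.List.mem_pyRange_one] at hi
        have hilen : i < ((xs.zip xs.tail).length : Int) := by
          simpa [PySem.List.len_eq] using hi.2
        rw [PySem.List.pyGetD_eq_getElem _ _ hi.1 hilen,
            PySem.List.pyGetD_eq_getElem _ _ hi.1 (by omega),
            PySem.List.pyGetD_eq_getElem _ _ (by omega) (by omega)]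
        have ht : (i + 1).toNat = i.toNat + 1 := by omega
        rw [List.getElem_zip]
        simp only [ht, List.getElem_tail]
    _ = (xs.zip xs.tail).foldl (fun acc p => g acc p.1 p.2) init := by
        have := PySem.List.foldl_pyRange_pyGetD (xs.zip xs.tail) (d, d)
          (fun acc p => g acc p.1 p.2) init (a := 0) (by omega)
        simpa using this

-- getD of B's nested-counter fold at w is the counting fold over the successors of w.
theorem counts_getD (l : List (String × String)) (d : PySem.Dict String (PySem.Dict String Int))
    (w : String) :
    ((l.foldl (fun d p => d.modify p.1 PySem.Dict.empty
        (fun inner => inner.insert p.2 (inner.getD p.2 0 + 1))) d).getD w PySem.Dict.empty)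
    = ((l.filter (fun p => p.1 == w)).map (fun p => p.2)).foldl
        (fun inner x => inner.insert x (inner.getD x 0 + 1)) (d.getD w PySem.Dict.empty) := by
  induction l generalizing d with
  | nil => simp
  | cons p t ih =>
      simp only [List.foldl_cons, List.filter_cons]
      by_cases hpw : p.1 = w
      · simp [hpw, ih]
      · have hb : (p.1 == w) = false := beq_eq_false_iff_ne.mpr hpw
        simp [hb, ih, PySem.Dict.getD_modify, Ne.symm hpw]

-- tail of both ports (everything after the guards), as a function of the word list
theorem tail_eq (words : List String) (h : words ≠ []) :
    (let markov : PySem.Dict String (List String) :=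
      (PySem.List.pyRange 0 (PySem.List.len words - 1) 1).foldl
        (fun d i => d.modify (PySem.List.pyGetD words i "") []
          (fun l => l ++ [PySem.List.pyGetD words (i + 1) ""])) PySem.Dict.empty
    let optimized : PySem.Dict String (List String) :=
      markov.items.foldl (fun acc p =>
        if 0 < p.2.length then
          let wc : PySem.Dict String Int :=
            p.2.foldl (fun d x => d.modify x 0 (fun c => c + 1)) PySem.Dict.empty
          let sw := PySem.List.sorted wc.items (fun q => q.2) true
          let top := ((PySem.List.slice sw none (some 5)).filter
            (fun q => 2 < PySem.Str.len q.1)).map (fun q => q.1)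
          if top ≠ [] then acc.insert p.1 top else acc
        else acc) PySem.Dict.empty
    if optimized.items ≠ [] then optimized.items
    else [("default", ["optimized", "successfully"])])
    = (let counts : PySem.Dict String (PySem.Dict String Int) :=
      (words.zip words.tail).foldl
        (fun d p => d.modify p.1 PySem.Dict.empty
          (fun inner => inner.insert p.2 (inner.getD p.2 0 + 1))) PySem.Dict.empty
    let optimized : PySem.Dict String (List String) :=
      counts.items.foldl (fun acc p =>
        let top := pvPick5 5 p.2.items []
        if top ≠ [] then acc.insert p.1 top else acc) PySem.Dict.empty
    if optimized.items ≠ [] then optimized.items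
    else [("default", ["optimized", "successfully"])]) := by
  simp only []
  rw [pyrange_pairs_fold words h
      (fun d a b => PySem.Dict.modify d a [] (fun l => l ++ [b])) PySem.Dict.empty ""]
  set pairs := words.zip words.tail with hpairs
  set M : PySem.Dict String (List String) :=
    pairs.foldl (fun d p => d.modify p.1 [] (fun l => l ++ [p.2])) PySem.Dict.empty with hM
  set C : PySem.Dict String (PySem.Dict String Int) :=
    pairs.foldl (fun d p => d.modify p.1 PySem.Dict.empty
      (fun inner => inner.insert p.2 (inner.getD p.2 0 + 1))) PySem.Dict.empty with hC
  have hKM : M.keys = PySem.Set.ofList (pairs.map (fun p => p.1)) := by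
    rw [hM, PySem.Dict.keys_foldl_modify_key pairs (fun p => p.1) []
      (fun _ p => fun l => l ++ [p.2]) PySem.Dict.empty]
    rfl
  have hKC : C.keys = PySem.Set.ofList (pairs.map (fun p => p.1)) := by
    rw [hC, PySem.Dict.keys_foldl_modify_key pairs (fun p => p.1) PySem.Dict.empty
      (fun _ p => fun inner => inner.insert p.2 (inner.getD p.2 0 + 1)) PySem.Dict.empty]
    rfl
  have hndM : M.keys.Nodup := by
    rw [hKM]; exact PySem.Set.nodup_ofList _
  have hndC : C.keys.Nodup := by
    rw [hKC]; exact PySem.Set.nodup_ofList _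
  have hgM : ∀ w, M.getD w [] = (pairs.filter (fun p => p.1 == w)).map (fun p => p.2) := by
    intro w
    rw [hM, PySem.Dict.getD_foldl_modify_append]
    simp
  have hgC : ∀ w, C.getD w PySem.Dict.empty
      = PySem.Dict.counter ((pairs.filter (fun p => p.1 == w)).map (fun p => p.2)) := by
    intro w
    rw [hC, counts_getD]
    simp only [PySem.Dict.getD_empty]
    exact PySem.Dict.foldl_insert_getD_add_one_eq_counter _
  have hIM : M.items = (PySem.Set.ofList (pairs.map (fun p => p.1))).map
      (fun k => (k, (pairs.filter (fun p => p.1 == k)).map (fun p => p.2))) := by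
    rw [PySem.Dict.items_eq_map_keys M hndM []]
    rw [hKM]
    exact List.map_congr_left (fun k _ => by rw [hgM k])
  have hIC : C.items = (PySem.Set.ofList (pairs.map (fun p => p.1))).map
      (fun k => (k, PySem.Dict.counter ((pairs.filter (fun p => p.1 == k)).map (fun p => p.2)))) := by
    rw [PySem.Dict.items_eq_map_keys C hndC PySem.Dict.empty]
    rw [hKC]
    exact List.map_congr_left (fun k _ => by rw [hgC k])
  have hopt :
      M.items.foldl (fun acc p =>
        if 0 < p.2.length then
          let wc : PySem.Dict String Int :=
            p.2.foldl (fun d x => d.modify x 0 (fun c => c + 1)) PySem.Dict.empty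
          let sw := PySem.List.sorted wc.items (fun q => q.2) true
          let top := ((PySem.List.slice sw none (some 5)).filter
            (fun q => 2 < PySem.Str.len q.1)).map (fun q => q.1)
          if top ≠ [] then acc.insert p.1 top else acc
        else acc) PySem.Dict.empty
      = C.items.foldl (fun acc p =>
        let top := pvPick5 5 p.2.items []
        if top ≠ [] then acc.insert p.1 top else acc) PySem.Dict.empty := by
    rw [hIM, hIC, List.foldl_map, List.foldl_map]
    apply PySem.List.foldl_congr_mem
    intro acc k hk
    have hk' : k ∈ pairs.map (fun p => p.1) := (PySem.Set.mem_ofList _ _).mp hk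
    obtain ⟨p, hp, rfl⟩ := List.mem_map.mp hk'
    have hmem : p ∈ pairs.filter (fun q => q.1 == p.1) :=
      List.mem_filter.mpr ⟨hp, by simp⟩
    have hne : (pairs.filter (fun q => q.1 == p.1)).map (fun q => q.2) ≠ [] := by
      simp only [ne_eq, List.map_eq_nil_iff]
      exact List.ne_nil_of_mem hmem
    have hlen : 0 < ((pairs.filter (fun q => q.1 == p.1)).map (fun q => q.2)).length :=
      List.length_pos_iff.mpr hne
    simp only [if_pos hlen]
    rw [pvTop5_eq]
    rfl
  rw [hopt]

-- ===== VERDICT (by name: the statement is the Claim_ definition above) =====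
theorem generate_markov_chain_py_spec : Claim_equal_generate_markov_chain_py := by
  intro text _
  unfold Spec_generate_markov_chain_py generate_markov_chain_py generate_markov_chain_py_alt
  by_cases h1 : text = "" ∨ PySem.Str.len (PySem.Str.strip text) < 50
  · rw [if_pos h1, if_pos h1]
  · rw [if_neg h1, if_neg h1]
    simp only []
    set ws := ((PySem.Str.split₀ (PySem.Str.replace (PySem.Str.replace text "\n" " ") "\t" " ")).filter
        (fun w => 2 < PySem.Str.len (PySem.Str.strip w))).map
        (fun w => PySem.Str.lower (PySem.Str.strip w)) with hws
    by_cases h2 : PySem.List.len ws < 10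
    · rw [if_pos h2, if_pos h2]
    · rw [if_neg h2, if_neg h2]
      have hw : ws ≠ [] := by
        intro hnil
        rw [hnil] at h2
        simp [PySem.List.len] at h2
      exact tail_eq ws hw
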